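-- pv_equiv track=rewrite | github.com/DaRK-52/Big-project-of-Database | HelloWorld/views.py | extract_node
-- ===== SOURCE A (Python) =====
-- def extract_node(str_node):
--     count=0
--     for i in range(len(str_node)):
--         if str_node[i]=='\'':
--             count+=1
--             if count==5:
--                 name1_left=i
--             elif count==6:
--                 name1_right=i
--             elif count==11:
--                 name2_left=i
--             elif count==12:
--                 name2_right=i
-- # 记录两个名字分别的左右端位置
--     return str_node[name1_left+1:name1_right],str_node[name2_left+1:name2_right]
-- ===== SOURCE B (Python) =====
-- def extract_node(str_node):
--     parts = str_node.split("'")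
--     return parts[5], parts[11]
-- ===== Notes on version B (the rewrite author's own statement) =====
-- stated objective: idiomatic
-- what changed: Replaces the index-tracking character scan that records the positions of the 5th/6th/11th/12th quotes (then slices) with a single split("'") followed by indexing segments 5 and 11; Pre_ requires at least 12 single quotes, exactly where A returns (A raises UnboundLocalError otherwise).
import Mathlib
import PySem

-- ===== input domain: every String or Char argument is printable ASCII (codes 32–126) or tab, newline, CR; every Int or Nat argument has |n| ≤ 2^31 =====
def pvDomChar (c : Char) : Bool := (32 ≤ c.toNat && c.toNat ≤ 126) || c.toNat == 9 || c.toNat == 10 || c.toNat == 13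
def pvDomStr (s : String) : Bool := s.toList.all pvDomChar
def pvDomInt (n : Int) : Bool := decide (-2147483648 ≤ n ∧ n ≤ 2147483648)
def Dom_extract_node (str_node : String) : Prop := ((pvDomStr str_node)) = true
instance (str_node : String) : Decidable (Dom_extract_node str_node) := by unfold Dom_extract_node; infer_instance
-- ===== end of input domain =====

-- B replaces A's position-tracking character scan (recording the 5th/6th/11th/12th quote
-- positions, then slicing) with the idiomatic split("'") followed by indexing segments 5 and 11.

-- ===== PORT A =====
-- loop state: (count, name1_left, name1_right, name2_left, name2_right); the four position
-- variables start unbound in Python, modelled as Option Int (none = unbound).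
abbrev PvSt : Type := Int × Option Int × Option Int × Option Int × Option Int

def pvBodyA (s : String) (st : PvSt) (i : Int) : PvSt :=
  if PySem.Str.pyGet? s i = some '\'' then
    match st with
    | (count, n1l, n1r, n2l, n2r) =>
      let count := count + 1
      if count = 5 then (count, some i, n1r, n2l, n2r)
      else if count = 6 then (count, n1l, some i, n2l, n2r)
      else if count = 11 then (count, n1l, n1r, some i, n2r)
      else if count = 12 then (count, n1l, n1r, n2l, some i)
      else (count, n1l, n1r, n2l, n2r)
  else st

def extract_node (str_node : String) : String × String :=
  match (PySem.List.pyRange 0 (PySem.Str.len str_node) 1).foldl (pvBodyA str_node)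
      ((0 : Int), none, none, none, none) with
  | (_, some n1l, some n1r, some n2l, some n2r) =>
      (PySem.Str.slice str_node (some (n1l + 1)) (some n1r),
       PySem.Str.slice str_node (some (n2l + 1)) (some n2r))
  | _ => ("", "")  -- a position variable is unbound: Python raises UnboundLocalError, excluded by Pre_

-- ===== PORT B =====
def extract_node_alt (str_node : String) : String × String :=
  let parts := (PySem.Str.split? str_node "'").getD []   -- sep ≠ "" so split? is always some
  ((PySem.List.pyGet? parts 5).getD "",                  -- parts[5] / parts[11]: none = IndexError,
   (PySem.List.pyGet? parts 11).getD "")                 -- excluded by Pre_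

-- ===== PRECONDITION & SPEC =====
-- Exactly the inputs on which Python A returns: the string contains at least 12 single
-- quotes (otherwise a name*_ variable stays unbound and A raises UnboundLocalError;
-- B raises IndexError there).
def Pre_extract_node (str_node : String) : Prop :=
  12 ≤ PySem.Str.count str_node "'" 
instance (str_node : String) : Decidable (Pre_extract_node str_node) := by
  unfold Pre_extract_node; infer_instance

def pvWitness_extract_node : String := "'a''b''c''d''e''f'"

def Spec_extract_node (str_node : String) (out : String × String) : Prop := out = extract_node_alt str_node
instance (str_node : String) (out : String × String) : Decidable (Spec_extract_node str_node out) := by unfold Spec_extract_node; infer_instance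

-- ===== CLAIM (what is proved, stated in full; the proofs are below) =====
def Claim_equal_extract_node : Prop := ∀ (str_node : String), Dom_extract_node str_node → Pre_extract_node str_node → Spec_extract_node str_node (extract_node str_node)

-- ===== LEMMAS AND PROOFS =====

-- quote predicate and the list of quote positions, left to right
def pvIsQ (c : Char) : Bool := c == '\''

def pvQpos : List Char → List Nat
  | [] => []
  | c :: cs => (if pvIsQ c then [0] else []) ++ (pvQpos cs).map (· + 1)

lemma pvQpos_length (cs : List Char) : (pvQpos cs).length = cs.countP pvIsQ := by
  induction cs with
  | nil => rfl
  | cons c cs ih =>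
    by_cases h : pvIsQ c <;> simp [pvQpos, List.countP_cons, ih, h]

lemma pvQpos_append (xs : List Char) (c : Char) :
    pvQpos (xs ++ [c]) = pvQpos xs ++ (if pvIsQ c then [xs.length] else []) := by
  induction xs with
  | nil => by_cases h : pvIsQ c <;> simp [pvQpos, h]
  | cons x xs ih =>
    by_cases h : pvIsQ c <;> simp [pvQpos, ih, h, List.map_append]

-- Python's s.count("'") is countP of the quote predicate
lemma pvCount_go (fuel : Nat) : ∀ (l : List Char) (acc : Nat), l.length ≤ fuel →
    PySem.Chars.count.go ['\''] fuel l acc = acc + l.countP pvIsQ := by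
  induction fuel with
  | zero =>
    intro l acc h
    have : l = [] := List.eq_nil_of_length_eq_zero (by omega)
    subst this
    simp [PySem.Chars.count.go]
  | succ f ih =>
    intro l acc h
    cases l with
    | nil => simp [PySem.Chars.count.go]
    | cons c rest =>
      by_cases hc : c = '\''
      · have hpre : List.isPrefixOf ['\''] (c :: rest) = true := by simp [List.isPrefixOf, hc]
        rw [PySem.Chars.count.go]
        simp only [hpre, if_true]
        rw [ih _ _ (by simpa using Nat.le_of_succ_le_succ (by simpa using h))]
        simp [List.countP_cons, pvIsQ, hc]
        omega
      · have hpre : List.isPrefixOf ['\''] (c :: rest) = false := by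
          simp only [List.isPrefixOf, Bool.and_true]
          exact decide_eq_false (fun h' => hc h'.symm)
        rw [PySem.Chars.count.go]
        simp only [hpre, Bool.false_eq_true, if_false]
        rw [ih _ _ (by simpa using Nat.le_of_succ_le_succ (by simpa using h))]
        simp [List.countP_cons, show pvIsQ c = false by simp [pvIsQ, hc]]

lemma pvCount_eq (s : String) :
    PySem.Str.count s "'" = s.toList.countP pvIsQ := by
  have h : ("'" : String).toList = ['\''] := by decide
  rw [PySem.Str.count, h]
  rw [show PySem.Chars.count s.toList ['\''] = PySem.Chars.count.go ['\''] s.toList.length s.toList 0 from by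
    simp [PySem.Chars.count]]
  simpa using pvCount_go s.toList.length s.toList 0 le_rfl

-- the invariant state reached after scanning a prefix
def pvOpt (l : List Nat) (k : Nat) : Option Int := (l[k]?).map (fun n => (n : Int))

def pvF (cs : List Char) : PvSt :=
  ((cs.countP pvIsQ : Int), pvOpt (pvQpos cs) 4, pvOpt (pvQpos cs) 5,
   pvOpt (pvQpos cs) 10, pvOpt (pvQpos cs) 11)

-- the per-character step of A's loop, acting on the character itself
def pvStep (n : Nat) (st : PvSt) (c : Char) : PvSt :=
  if c = '\'' then
    match st with
    | (count, n1l, n1r, n2l, n2r) =>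
      let count := count + 1
      if count = 5 then (count, some (n : Int), n1r, n2l, n2r)
      else if count = 6 then (count, n1l, some (n : Int), n2l, n2r)
      else if count = 11 then (count, n1l, n1r, some (n : Int), n2r)
      else if count = 12 then (count, n1l, n1r, n2l, some (n : Int))
      else (count, n1l, n1r, n2l, n2r)
  else st

def pvScan : List Char → Nat → PvSt → PvSt
  | [], _, st => st
  | c :: cs, n, st => pvScan cs (n + 1) (pvStep n st c)

lemma pvOpt_append_one (l : List Nat) (n k : Nat) :
    pvOpt (l ++ [n]) k = if l.length = k then some (n : Int) else pvOpt l k := by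
  by_cases h : l.length = k
  · subst h; simp [pvOpt]
  · rcases Nat.lt_or_ge k l.length with hk | hk
    · simp [pvOpt, List.getElem?_append_left hk, h]
    · have hlt : l.length < k := by omega
      have h1 : (l ++ [n])[k]? = none := List.getElem?_eq_none_iff.2 (by simp; omega)
      have h2 : l[k]? = (none : Option Nat) := List.getElem?_eq_none_iff.2 (by omega)
      simp [pvOpt, h1, h2, h]

lemma pvStep_F (pre : List Char) (c : Char) :
    pvStep pre.length (pvF pre) c = pvF (pre ++ [c]) := by
  by_cases hc : c = '\''
  · have hq : pvIsQ c = true := by simp [pvIsQ, hc]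
    have hlen : (pvQpos pre).length = pre.countP pvIsQ := pvQpos_length pre
    simp only [pvStep, pvF, hc, pvQpos_append, pvIsQ, List.countP_append,
      List.countP_cons, List.countP_nil, beq_self_eq_true, if_true, if_pos rfl]
    simp only [pvOpt_append_one, hlen]
    simp only [show ((List.countP pvIsQ pre : Int) + 1 = 5) ↔ (List.countP pvIsQ pre = 4) from by omega,
      show ((List.countP pvIsQ pre : Int) + 1 = 6) ↔ (List.countP pvIsQ pre = 5) from by omega,
      show ((List.countP pvIsQ pre : Int) + 1 = 11) ↔ (List.countP pvIsQ pre = 10) from by omega,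
      show ((List.countP pvIsQ pre : Int) + 1 = 12) ↔ (List.countP pvIsQ pre = 11) from by omega]
    split_ifs with h5 h6 h11 h12 <;> push_cast <;> simp_all
  · have hq : pvIsQ c = false := by simp [pvIsQ, hc]
    simp [pvStep, pvF, hc, pvQpos_append, hq, List.countP_append, List.countP_cons]

lemma pvFold_scan (s : String) (suf pre : List Char) (st : PvSt)
    (h : s.toList = pre ++ suf) :
    (PySem.List.pyRange (pre.length : Int) ((pre.length : Int) + suf.length) 1).foldl
      (pvBodyA s) st = pvScan suf pre.length st := by
  induction suf generalizing pre st with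
  | nil => simp [pvScan]
  | cons c cs ih =>
    rw [PySem.List.pyRange_one_cons (by simp)]
    have hget : PySem.Str.pyGet? s (pre.length : Int) = some c := by
      have : PySem.List.pyGet? s.toList (pre.length : Int) = some c := by
        rw [h]; exact PySem.List.pyGet?_append_length pre cs c
      simpa using this
    have hbody : pvBodyA s st (pre.length : Int) = pvStep pre.length st c := by
      simp only [pvBodyA, pvStep, hget]
      by_cases hc : c = '\'' <;> simp [hc]
    have ih' := ih (pre ++ [c]) (pvStep pre.length st c) (by simpa using h)
    simp only [List.foldl_cons, hbody, pvScan]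
    simp only [List.length_append, List.length_cons, List.length_nil] at ih'
    simp only [List.length_cons] at ⊢ ih'
    push_cast at ih' ⊢
    convert ih' using 3
    omega

lemma pvScan_F (suf : List Char) : ∀ (pre : List Char),
    pvScan suf pre.length (pvF pre) = pvF (pre ++ suf) := by
  induction suf with
  | nil => intro pre; simp [pvScan]
  | cons c cs ih =>
    intro pre
    have := ih (pre ++ [c])
    simp only [pvScan, pvStep_F]
    simpa using this

-- PySem.Chars.splitOn on the single-quote separator is List.splitOnP pvIsQ
lemma pvSplitOn_go (fuel : Nat) : ∀ (l cur : List Char) (acc : List (List Char)),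
    l.length ≤ fuel →
    PySem.Chars.splitOn.go ['\''] fuel l cur acc
      = acc.reverse ++ (List.splitOnP pvIsQ l).modifyHead (cur.reverse ++ ·) := by
  induction fuel with
  | zero =>
    intro l cur acc h
    have : l = [] := List.eq_nil_of_length_eq_zero (by omega)
    subst this
    simp [PySem.Chars.splitOn.go, List.splitOnP_nil]
  | succ f ih =>
    intro l cur acc h
    cases l with
    | nil => simp [PySem.Chars.splitOn.go, List.splitOnP_nil]
    | cons c rest =>
      by_cases hc : c = '\''
      · have hpre : List.isPrefixOf ['\''] (c :: rest) = true := by simp [List.isPrefixOf, hc]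
        rw [PySem.Chars.splitOn.go]
        simp only [hpre, if_true]
        rw [ih _ _ _ (by simpa using Nat.le_of_succ_le_succ (by simpa using h))]
        simp only [List.splitOnP_cons, show pvIsQ c = true by simp [pvIsQ, hc], if_true]
        cases hsp : List.splitOnP pvIsQ rest <;> simp [hsp]
      · have hpre : List.isPrefixOf ['\''] (c :: rest) = false := by
          simp only [List.isPrefixOf, List.isPrefixOf_nil_left, Bool.and_true, beq_iff_eq]
          exact decide_eq_false (fun h' => hc h'.symm)
        rw [PySem.Chars.splitOn.go]
        simp only [hpre, Bool.false_eq_true, if_false]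
        rw [ih _ _ _ (by simpa using Nat.le_of_succ_le_succ (by simpa using h))]
        simp only [List.splitOnP_cons, show pvIsQ c = false by simp [pvIsQ, hc],
          Bool.false_eq_true, if_false, List.modifyHead_modifyHead]
        congr 2
        funext x
        simp

lemma pvSplitOn_eq (cs : List Char) :
    PySem.Chars.splitOn cs ['\''] = List.splitOnP pvIsQ cs := by
  have h1 := pvSplitOn_go (cs.length + 1) cs [] [] (by omega)
  have h2 : (List.splitOnP pvIsQ cs).modifyHead (fun x => x) = List.splitOnP pvIsQ cs := by
    cases List.splitOnP pvIsQ cs <;> simp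
  simpa [PySem.Chars.splitOn, h2] using h1

-- segment j of the split is the slice between quote j-1 and quote j
def pvStart (cs : List Char) (j : Nat) : Nat :=
  if j = 0 then 0 else (pvQpos cs)[j-1]?.getD 0 + 1
def pvStop (cs : List Char) (j : Nat) : Nat :=
  (pvQpos cs)[j]?.getD cs.length

lemma pvSeg (cs : List Char) : ∀ (j : Nat), j ≤ (pvQpos cs).length →
    (List.splitOnP pvIsQ cs)[j]?
      = some ((cs.drop (pvStart cs j)).take (pvStop cs j - pvStart cs j)) := by
  induction cs with
  | nil =>
    intro j h
    simp [pvQpos] at h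
    subst h
    simp [List.splitOnP_nil, pvStart, pvStop]
  | cons c cs ih =>
    intro j h
    by_cases hc : pvIsQ c = true
    · simp only [List.splitOnP_cons, hc, if_true]
      cases j with
      | zero =>
        simp [pvStart, pvStop, pvQpos, hc]
      | succ j' =>
        have hlen : j' ≤ (pvQpos cs).length := by
          simp [pvQpos, hc] at h; omega
        have := ih j' hlen
        simp only [List.getElem?_cons_succ, this]
        congr 1
        have hq : pvQpos (c :: cs) = 0 :: (pvQpos cs).map (· + 1) := by simp [pvQpos, hc]
        cases j' with
        | zero =>
          simp [pvStart, pvStop, hq, List.getElem?_map]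
        | succ j'' =>
          obtain ⟨q, h0⟩ : ∃ q, (pvQpos cs)[j'']? = some q :=
            ⟨_, List.getElem?_eq_getElem (by omega)⟩
          cases h1 : (pvQpos cs)[j''+1]? <;>
            simp [pvStart, pvStop, hq, List.getElem?_map, h0, h1]
    · have hc' : pvIsQ c = false := by simpa using hc
      simp only [List.splitOnP_cons, hc', Bool.false_eq_true, if_false]
      have hq : pvQpos (c :: cs) = (pvQpos cs).map (· + 1) := by simp [pvQpos, hc']
      cases j with
      | zero =>
        have := ih 0 (by omega)
        rcases hsp : List.splitOnP pvIsQ cs with _ | ⟨hd, tl⟩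
        · exact absurd hsp (List.splitOnP_ne_nil _ _)
        · rw [hsp] at this
          simp at this
          simp [this, pvStart, pvStop, hq, List.getElem?_map]
      | succ j' =>
        have hlen : j' + 1 ≤ (pvQpos cs).length := by simp [hq] at h; omega
        have := ih (j'+1) hlen
        rcases hsp : List.splitOnP pvIsQ cs with _ | ⟨hd, tl⟩
        · exact absurd hsp (List.splitOnP_ne_nil _ _)
        · rw [hsp] at this
          simp only [List.modifyHead_cons, List.getElem?_cons_succ] at this ⊢
          rw [this]
          congr 1
          obtain ⟨q, h0⟩ : ∃ q, (pvQpos cs)[j']? = some q :=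
            ⟨_, List.getElem?_eq_getElem (by omega)⟩
          cases h1 : (pvQpos cs)[j'+1]? <;>
            simp [pvStart, pvStop, hq, List.getElem?_map, h0, h1]

-- ===== VERDICT (by name: the statement is the Claim_ definition above) =====
theorem extract_node_spec : Claim_equal_extract_node := by
  intro s _ hPre
  unfold Pre_extract_node at hPre
  unfold Spec_extract_node extract_node extract_node_alt
  -- A's fold computes pvF s.toList
  have hlen : PySem.Str.len s = ((s.toList.length : Nat) : Int) := by simp [PySem.Str.len]
  have hfold : (PySem.List.pyRange 0 (PySem.Str.len s) 1).foldl (pvBodyA s)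
      ((0 : Int), none, none, none, none) = pvF s.toList := by
    have h1 := pvFold_scan s s.toList [] ((0 : Int), none, none, none, none) (by simp)
    have h2 := pvScan_F s.toList []
    simp only [List.length_nil, Nat.cast_zero, zero_add, List.nil_append] at h1 h2
    rw [hlen, h1, ← h2]
    rfl
  -- the quote positions 4,5,10,11 exist
  have hql : 12 ≤ (pvQpos s.toList).length := by
    rw [pvQpos_length, ← pvCount_eq]; exact hPre
  obtain ⟨q4, h4⟩ : ∃ q, (pvQpos s.toList)[4]? = some q := ⟨_, List.getElem?_eq_getElem (by omega)⟩
  obtain ⟨q5, h5⟩ : ∃ q, (pvQpos s.toList)[5]? = some q := ⟨_, List.getElem?_eq_getElem (by omega)⟩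
  obtain ⟨q10, h10⟩ : ∃ q, (pvQpos s.toList)[10]? = some q := ⟨_, List.getElem?_eq_getElem (by omega)⟩
  obtain ⟨q11, h11⟩ : ∃ q, (pvQpos s.toList)[11]? = some q := ⟨_, List.getElem?_eq_getElem (by omega)⟩
  rw [hfold]
  -- B's split is List.splitOnP pvIsQ
  have hsep : ("'" : String).toList = ['\''] := by decide
  have hspl : Option.map (List.map String.toList) (PySem.Str.split? s "'")
      = some (List.splitOnP pvIsQ s.toList) := by
    rw [PySem.Str.split?_map, hsep]
    simp [PySem.Chars.split?, pvSplitOn_eq]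
  obtain ⟨parts, hparts, hmap⟩ : ∃ parts, PySem.Str.split? s "'" = some parts ∧
      parts.map String.toList = List.splitOnP pvIsQ s.toList := by
    rcases hx : PySem.Str.split? s "'" with _ | parts
    · rw [hx] at hspl; simp at hspl
    · rw [hx] at hspl; simp at hspl; exact ⟨parts, rfl, hspl⟩
  rw [hparts]
  -- the two indexed segments
  have hget : ∀ (j : Nat) (seg : List Char), (List.splitOnP pvIsQ s.toList)[j]? = some seg →
      PySem.List.pyGet? parts ((j : Nat) : Int) = some (String.ofList seg) := by
    intro j seg hj
    rw [← hmap, List.getElem?_map] at hj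
    rcases hp : parts[j]? with _ | p
    · rw [hp] at hj; simp at hj
    · rw [hp] at hj
      simp only [Option.map_some, Option.some.injEq] at hj
      rw [PySem.List.pyGet?_natCast, hp]
      refine congrArg some (String.toList_inj.mp ?_)
      simp [hj]
  have hg5 := hget 5 _ (pvSeg s.toList 5 (by omega))
  have hg11 := hget 11 _ (pvSeg s.toList 11 (by omega))
  norm_num at hg5 hg11
  have e4 : pvOpt (pvQpos s.toList) 4 = some ((q4 : Nat) : Int) := by simp [pvOpt, h4]
  have e5 : pvOpt (pvQpos s.toList) 5 = some ((q5 : Nat) : Int) := by simp [pvOpt, h5]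
  have e10 : pvOpt (pvQpos s.toList) 10 = some ((q10 : Nat) : Int) := by simp [pvOpt, h10]
  have e11 : pvOpt (pvQpos s.toList) 11 = some ((q11 : Nat) : Int) := by simp [pvOpt, h11]
  simp only [pvF, e4, e5, e10, e11, hg5, hg11, Option.getD_some]
  -- the two slices agree with the segments
  refine Prod.ext ?_ ?_ <;> dsimp only
  · apply String.toList_inj.mp
    rw [PySem.Str.toList_slice, PySem.Chars.slice_eq_listSlice,
      show ((q4 : Int) + 1) = (((q4 + 1 : Nat)) : Int) by push_cast; ring,
      PySem.List.slice_natCast]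
    simp [pvStart, pvStop, h4, h5]
  · apply String.toList_inj.mp
    rw [PySem.Str.toList_slice, PySem.Chars.slice_eq_listSlice,
      show ((q10 : Int) + 1) = (((q10 + 1 : Nat)) : Int) by push_cast; ring,
      PySem.List.slice_natCast]
    simp [pvStart, pvStop, h10, h11]
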